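-- pv_equiv track=rewrite | github.com/infiniflow/infinity | scripts/collect_thread_sanitizer_log.py | filter_warning
-- ===== SOURCE A (Python) =====
-- filter_keywords = [
--     # https://stackoverflow.com/questions/53917857/c-thrift-is-tthreadedserverstop-thread-safe
--     "TServerSocket::interruptChildren",
--     "TServerSocket::notify",
--     "TServerSocket::interrupt",
--     #
-- ]
--
-- thread_sanitizer_delimiter = "=================="
--
-- def filter_warning(lines: list[str]):
--     ret = []
--     warning = []
--     in_warning = False
--     skip = False
--     for line in lines:
--         if thread_sanitizer_delimiter in line:
--             in_warning = not in_warning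
--             if not skip:
--                 warning.append(line)
--             if not in_warning:
--                 if not skip:
--                     ret.extend(warning)
--                 warning = []
--                 skip = False
--         elif in_warning:
--             if skip:
--                 continue
--             for keyword in filter_keywords:
--                 if keyword in line:
--                     skip = True
--                     warning.clear()
--                     break
--             if not skip:
--                 warning.append(line)
--     return ret
-- ===== SOURCE B (Python) =====
-- filter_keywords = [
--     "TServerSocket::interruptChildren",
--     "TServerSocket::notify",
--     "TServerSocket::interrupt",
-- ]
--
-- thread_sanitizer_delimiter = "=================="
--
-- def filter_warning(lines: list[str]):
--     # Buffer whole blocks and decide their fate once, at block close.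
--     ret = []
--     block = None
--     for line in lines:
--         if thread_sanitizer_delimiter in line:
--             if block is None:
--                 block = [line]
--             else:
--                 block.append(line)
--                 if not any(k in l for l in block[1:-1] for k in filter_keywords):
--                     ret.extend(block)
--                 block = None
--         elif block is not None:
--             block.append(line)
--     return ret
-- ===== Notes on version B (the rewrite author's own statement) =====
-- stated objective: simpler
-- what changed: B replaces A's three pieces of mutable state (warning buffer, in_warning flag, skip flag with incremental keyword detection and mid-block clearing) by a single optional block buffer that collects each block whole and decides its fate once at block close with one any() scan over the interior lines.
import Mathlib
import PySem

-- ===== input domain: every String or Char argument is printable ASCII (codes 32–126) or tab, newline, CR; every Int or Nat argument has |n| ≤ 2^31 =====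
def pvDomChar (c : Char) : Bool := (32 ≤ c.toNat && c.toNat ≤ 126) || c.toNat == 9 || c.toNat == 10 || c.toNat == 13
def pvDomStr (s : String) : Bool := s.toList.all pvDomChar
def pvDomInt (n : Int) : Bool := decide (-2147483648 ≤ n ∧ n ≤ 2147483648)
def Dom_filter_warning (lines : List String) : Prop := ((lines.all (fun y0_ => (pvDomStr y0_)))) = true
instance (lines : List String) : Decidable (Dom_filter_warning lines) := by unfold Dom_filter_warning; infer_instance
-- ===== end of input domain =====

-- B buffers each delimiter-bounded block whole and decides once at block close; one line of honest intent:
-- same output as A, simpler state (one optional buffer instead of buffer+flag+skip).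

def pvKeywords : List String :=
  ["TServerSocket::interruptChildren", "TServerSocket::notify", "TServerSocket::interrupt"]

def pvDelim : String := "=================="

-- ===== PORT A =====
-- state: (ret, warning, in_warning, skip)
def fwStepA (st : List String × List String × Bool × Bool) (line : String) :
    List String × List String × Bool × Bool :=
  let (ret, warning, inW, skip) := st
  if PySem.Str.isIn pvDelim line then
    let inW' := !inW
    let warning' := if !skip then warning ++ [line] else warning
    if !inW' then
      ((if !skip then ret ++ warning' else ret), [], inW', false)
    else
      (ret, warning', inW', skip)
  else if inW then
    if skip then st
    else if pvKeywords.any (fun k => PySem.Str.isIn k line) then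
      (ret, [], inW, true)
    else
      (ret, warning ++ [line], inW, skip)
  else st

def filter_warning (lines : List String) : List String :=
  (lines.foldl fwStepA ([], [], false, false)).1

-- ===== PORT B =====
-- state: (ret, optional current block buffer)
def fwStepB (st : List String × Option (List String)) (line : String) :
    List String × Option (List String) :=
  let (ret, blk?) := st
  if PySem.Str.isIn pvDelim line then
    match blk? with
    | none => (ret, some [line])
    | some buf =>
      let blk2 := buf ++ [line]
      if !((PySem.List.slice blk2 (some 1) (some (-1))).any
            (fun l => pvKeywords.any (fun k => PySem.Str.isIn k l))) then
        (ret ++ blk2, none)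
      else
        (ret, none)
  else
    match blk? with
    | some buf => (ret, some (buf ++ [line]))
    | none => st

def filter_warning_alt (lines : List String) : List String :=
  (lines.foldl fwStepB ([], none)).1

-- ===== PRECONDITION & SPEC =====
def Spec_filter_warning (lines : List String) (out : List String) : Prop := out = filter_warning_alt lines
instance (lines : List String) (out : List String) : Decidable (Spec_filter_warning lines out) := by unfold Spec_filter_warning; infer_instance

-- ===== CLAIM (what is proved, stated in full; the proofs are below) =====
def Claim_equal_filter_warning : Prop := ∀ (lines : List String), Dom_filter_warning lines → Spec_filter_warning lines (filter_warning lines)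

-- ===== LEMMAS AND PROOFS =====

def fwHasKW (line : String) : Bool := pvKeywords.any (fun k => PySem.Str.isIn k line)

-- invariant relating A's loop state to B's loop state
def fwRel (a : List String × List String × Bool × Bool) (b : List String × Option (List String)) : Prop :=
  a.1 = b.1 ∧
  match b.2 with
  | none => a.2.2.1 = false ∧ a.2.1 = [] ∧ a.2.2.2 = false
  | some buf => a.2.2.1 = true ∧ buf ≠ [] ∧
      (if a.2.2.2 then a.2.1 = [] ∧ buf.tail.any fwHasKW = true
       else a.2.1 = buf ∧ buf.tail.any fwHasKW = false)

lemma fwSlice (x line : String) (rest : List String) :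
    PySem.List.slice (x :: (rest ++ [line])) (some 1) (some (-1)) = rest := by
  simp [PySem.List.slice]

lemma fwStep_rel (line : String) (a : List String × List String × Bool × Bool)
    (b : List String × Option (List String)) (h : fwRel a b) :
    fwRel (fwStepA a line) (fwStepB b line) := by
  obtain ⟨ret, warning, inW, skip⟩ := a
  obtain ⟨retB, blk?⟩ := b
  cases blk? with
  | none =>
    obtain ⟨h1, h2, h3, h4⟩ := h
    subst h1 h2 h3 h4
    by_cases hd : PySem.Chars.isIn pvDelim.toList line.toList = true <;>
      simp [fwStepA, fwStepB, fwRel, hd]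
  | some buf =>
    obtain ⟨h1, h2, h3, h5⟩ := h
    simp only at h1 h2 h3 h5
    subst h1 h2
    obtain ⟨x, rest, rfl⟩ : ∃ x rest, buf = x :: rest := by
      cases buf with
      | nil => exact absurd rfl h3
      | cons x rest => exact ⟨x, rest, rfl⟩
    by_cases hd : PySem.Chars.isIn pvDelim.toList line.toList = true
    · by_cases hs : skip
      · simp [hs, fwHasKW] at h5
        obtain ⟨hw, l, hl, k, hk, hik⟩ := h5
        have hcond : ¬ ∀ y ∈ rest, ∀ z ∈ pvKeywords, PySem.Chars.isIn z.toList y.toList = false := by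
          push Not; exact ⟨l, hl, k, hk, by simp [hik]⟩
        simp [fwStepA, fwStepB, fwRel, hd, hs, fwSlice, hcond]
      · simp [hs, fwHasKW] at h5
        have hcond : ∀ y ∈ rest, ∀ z ∈ pvKeywords, PySem.Chars.isIn z.toList y.toList = false := h5.2
        simp [fwStepA, fwStepB, fwRel, hd, hs, fwSlice, h5.1, if_pos hcond]
    · by_cases hs : skip
      · simp [hs, fwHasKW] at h5
        simp [fwStepA, fwStepB, fwRel, hd, hs, fwHasKW, h5.1]
        exact Or.inl h5.2
      · simp [hs, fwHasKW] at h5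
        by_cases hk : fwHasKW line
        · simp [fwHasKW] at hk
          simp [fwStepA, fwStepB, fwRel, hd, hs, fwHasKW, hk]
        · simp [fwHasKW] at hk
          have hcond : ¬ ∃ y ∈ pvKeywords, PySem.Chars.isIn y.toList line.toList = true := by
            push Not; intro y hy; simp [hk y hy]
          simp [fwStepA, fwStepB, fwRel, hd, hs, fwHasKW, h5.1, hcond]
          exact ⟨h5.2, hk⟩

lemma fwFold_rel (lines : List String) (a : List String × List String × Bool × Bool)
    (b : List String × Option (List String)) (h : fwRel a b) :
    fwRel (lines.foldl fwStepA a) (lines.foldl fwStepB b) := by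
  induction lines generalizing a b with
  | nil => exact h
  | cons line rest ih => exact ih _ _ (fwStep_rel line a b h)

-- ===== VERDICT (by name: the statement is the Claim_ definition above) =====
theorem filter_warning_spec : Claim_equal_filter_warning := by
  intro lines _
  unfold Spec_filter_warning filter_warning filter_warning_alt
  exact (fwFold_rel lines ([], [], false, false) ([], none) (by simp [fwRel])).1
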